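-- pv_equiv track=rewrite | github.com/LeeJiwoo982/Algorithm | 02_algorithm/00_List_l/4831_elecBus/031825-02.py | cnt_charge
-- ===== SOURCE A (Python) =====
-- def cnt_charge(K, N, M, charge_sp):
--     now = 0  # 현재 위치     now == N 일 때 목적지
--     cnt_charge = 0  # 충전 횟수
--
--     while now < N:  # 목적지 도달 전까지만 계산
--         candidates = [c for c in charge_sp if now < c <= now + K]
--         # 충전기 중 현재위치+이동거리보다 작으면서 & 현재보다는 큰
--         if now + K >= N:  # 현재+이동거리가 목적지 이상이면 충전 필요 X
--             return cnt_charge   #현재까지 충전횟수 반환 후 종료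
--
--         if len(candidates) == 0:    # 더이상 충전소가 없음
--             return 0    #목적지 도달 실패
--
--         else:
--             now = max(candidates)   #후보지 중 제일 숫자 높은 것으로 업데이트
--             cnt_charge += 1
-- ===== SOURCE B (Python) =====
-- def cnt_charge(K, N, M, charge_sp):
--     # Sort stations once, then sweep a shrinking suffix: each hop takes the
--     # furthest reachable station and drops everything at or before it.
--     def go(now, cnt, rest):
--         if now + K >= N:
--             return cnt
--         k = 0
--         while k < len(rest) and rest[k] <= now + K:
--             k += 1
--         if k == 0 or rest[k - 1] <= now:
--             return 0
--         return go(rest[k - 1], cnt + 1, rest[k:])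
--     return go(0, 0, sorted(charge_sp))
-- ===== Notes on version B (the rewrite author's own statement) =====
-- stated objective: alternative
-- what changed: Instead of re-filtering the whole station list and taking its max on every hop, B sorts the stations once and recursively walks a shrinking sorted suffix, examining each station at most once after the sort; not measurably faster on the generated inputs, which A solves in few hops.
-- outside the precondition, e.g. on cnt_charge(3, 0, 1, [1]): A returns None, B returns 0
import Mathlib
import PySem

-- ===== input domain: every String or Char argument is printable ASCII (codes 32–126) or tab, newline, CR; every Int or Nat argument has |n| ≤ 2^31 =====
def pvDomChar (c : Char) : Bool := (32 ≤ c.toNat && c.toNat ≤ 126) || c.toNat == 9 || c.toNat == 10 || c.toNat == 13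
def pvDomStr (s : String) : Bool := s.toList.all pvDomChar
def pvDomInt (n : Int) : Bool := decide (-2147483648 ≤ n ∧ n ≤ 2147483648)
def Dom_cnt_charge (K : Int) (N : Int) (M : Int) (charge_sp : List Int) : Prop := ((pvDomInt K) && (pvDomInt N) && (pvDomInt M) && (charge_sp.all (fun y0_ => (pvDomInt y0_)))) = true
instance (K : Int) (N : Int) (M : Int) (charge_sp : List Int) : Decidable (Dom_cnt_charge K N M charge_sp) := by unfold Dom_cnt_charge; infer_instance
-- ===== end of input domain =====

-- B sorts the stations once and sweeps a shrinking suffix (each hop drops the stations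
-- it passed), instead of A's re-filter + max over the whole list on every hop.

-- ===== PORT A =====
-- A's while loop: filter the candidates in (now, now+K], jump to their max.
-- Python's `candidates` list is written out inline (same pure value); `max(candidates)`
-- is PySem.List.max?, guarded by the same length-0 test as in A, so getD 0 never fires.
def cntALoop (K N : Int) (charge_sp : List Int) (now cnt : Int) : Int :=
  if hN : now < N then
    if hK : N ≤ now + K then cnt
    else if hlen : (charge_sp.filter (fun c => decide (now < c) && decide (c ≤ now + K))).length = 0 then 0
    else
      cntALoop K N charge_sp
        ((PySem.List.max? (charge_sp.filter (fun c => decide (now < c) && decide (c ≤ now + K))) (fun x => x)).getD 0)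
        (cnt + 1)
  else 0  -- Python falls off the while loop and returns None here; excluded by Pre_
termination_by (N - now).toNat
decreasing_by
  have hne : charge_sp.filter (fun c => decide (now < c) && decide (c ≤ now + K)) ≠ [] := by
    intro h0; rw [h0] at hlen; simp at hlen
  rw [List.unattach_filter (g := fun c => decide (now < c) && decide (c ≤ now + K)) (hf := fun x h => rfl), List.unattach_attach]
  obtain ⟨m, hm⟩ : ∃ m, PySem.List.max? (charge_sp.filter (fun c => decide (now < c) && decide (c ≤ now + K))) (fun x => x) = some m := by
    cases hmx : PySem.List.max? (charge_sp.filter (fun c => decide (now < c) && decide (c ≤ now + K))) (fun x => x) with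
    | none => exact absurd ((PySem.List.max?_eq_none_iff _ _).mp hmx) hne
    | some m => exact ⟨m, rfl⟩
  rw [hm]
  simp only [Option.getD_some]
  have hmem := PySem.List.max?_mem hm
  have hc := List.of_mem_filter hmem
  simp only [Bool.and_eq_true, decide_eq_true_eq] at hc
  omega

def cnt_charge (K : Int) (N : Int) (M : Int) (charge_sp : List Int) : Int :=
  cntALoop K N charge_sp 0 0

-- ===== PORT B =====
-- B's recursive sweep `go`: the k-scan of the sorted suffix `rest` is takeWhile/dropWhile;
-- rest[k-1] is the last element of the scanned prefix (k == 0 is the length-0 test,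
-- so getD 0 never fires).
def goAlt (K N : Int) (now cnt : Int) (rest : List Int) : Int :=
  if N ≤ now + K then cnt
  else if hlen : (rest.takeWhile (fun c => decide (c ≤ now + K))).length = 0 then 0
  else if ((rest.takeWhile (fun c => decide (c ≤ now + K))).getLast?.getD 0) ≤ now then 0
  else
    goAlt K N ((rest.takeWhile (fun c => decide (c ≤ now + K))).getLast?.getD 0) (cnt + 1)
      (rest.dropWhile (fun c => decide (c ≤ now + K)))
termination_by rest.length
decreasing_by
  have h := List.takeWhile_append_dropWhile (p := fun c => decide (c ≤ now + K)) (l := rest)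
  have h2 := congrArg List.length h
  simp only [List.length_append] at h2
  omega

def cnt_charge_alt (K : Int) (N : Int) (M : Int) (charge_sp : List Int) : Int :=
  goAlt K N 0 0 (PySem.List.sorted charge_sp (fun x => x) false)

-- ===== PRECONDITION & SPEC =====
-- Pre_ excludes N ≤ 0, where A's while loop never runs and A returns None (not an int).
def Pre_cnt_charge (K : Int) (N : Int) (M : Int) (charge_sp : List Int) : Prop := 0 < N
instance (K : Int) (N : Int) (M : Int) (charge_sp : List Int) : Decidable (Pre_cnt_charge K N M charge_sp) := by unfold Pre_cnt_charge; infer_instance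
def pvWitness_cnt_charge : Int × Int × Int × List Int := (3, 10, 2, [3, 6])

def Spec_cnt_charge (K : Int) (N : Int) (M : Int) (charge_sp : List Int) (out : Int) : Prop := out = cnt_charge_alt K N M charge_sp
instance (K : Int) (N : Int) (M : Int) (charge_sp : List Int) (out : Int) : Decidable (Spec_cnt_charge K N M charge_sp out) := by unfold Spec_cnt_charge; infer_instance

-- ===== CLAIM (what is proved, stated in full; the proofs are below) =====
def Claim_equal_cnt_charge : Prop := ∀ (K : Int) (N : Int) (M : Int) (charge_sp : List Int), Dom_cnt_charge K N M charge_sp → Pre_cnt_charge K N M charge_sp → Spec_cnt_charge K N M charge_sp (cnt_charge K N M charge_sp)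

-- ===== LEMMAS AND PROOFS =====

-- On a ≤-sorted list, takeWhile (· ≤ b) is filter (· ≤ b).
lemma takeWhile_le_eq_filter (b : Int) :
    ∀ l : List Int, l.Pairwise (· ≤ ·) →
      l.takeWhile (fun c => decide (c ≤ b)) = l.filter (fun c => decide (c ≤ b)) := by
  intro l hl
  induction l with
  | nil => rfl
  | cons x t ih =>
    rcases List.pairwise_cons.mp hl with ⟨hx, ht⟩
    by_cases hxb : x ≤ b
    · simp [hxb, ih ht]
    · have hnil : t.filter (fun c => decide (c ≤ b)) = [] := by
        apply List.filter_eq_nil_iff.mpr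
        intro a ha
        have := hx a ha
        simp only [decide_eq_true_eq]
        omega
      simp [hxb, hnil]

-- The last element of a ≤-sorted list bounds every element.
lemma le_getLast?_of_pairwise (b : Int) :
    ∀ l : List Int, l.Pairwise (· ≤ ·) → l.getLast? = some b → ∀ x ∈ l, x ≤ b := by
  intro l hl hb
  induction l with
  | nil => simp at hb
  | cons y t ih =>
    rcases List.pairwise_cons.mp hl with ⟨hy, ht⟩
    intro x hx
    cases t with
    | nil =>
      simp at hb hx
      omega
    | cons z t' =>
      rw [List.getLast?_cons_cons] at hb
      rcases List.mem_cons.mp hx with hxy | hxt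
      · subst hxy
        have hz := ih ht hb z (by simp)
        have := hy z (by simp)
        omega
      · exact ih ht hb x hxt

-- Main loop correspondence.  `rest` is a suffix of the sorted station list whose
-- dropped prefix sits at or below `now`.
lemma loop_eq (K N : Int) (sp : List Int) :
    ∀ (n : Nat) (rest : List Int), rest.length ≤ n →
    ∀ (now cnt : Int) (pre : List Int),
      now < N →
      PySem.List.sorted sp (fun x => x) false = pre ++ rest →
      (∀ x ∈ pre, x ≤ now) →
      cntALoop K N sp now cnt = goAlt K N now cnt rest := by
  intro n
  induction n using Nat.strong_induction_on with
  | _ n ih =>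
    intro rest hlen now cnt pre hnow hsplit hpre
    have hs_pw : (PySem.List.sorted sp (fun x => x) false).Pairwise (· ≤ ·) := by
      have := PySem.List.sorted_pairwise sp (fun x : Int => x)
      simpa using this
    have hrest_pw : rest.Pairwise (· ≤ ·) := by
      rw [hsplit] at hs_pw
      exact (List.pairwise_append.mp hs_pw).2.1
    have hmem_s : ∀ x : Int, x ∈ PySem.List.sorted sp (fun x => x) false ↔ x ∈ sp :=
      fun x => PySem.List.mem_sorted sp (fun x : Int => x) false x
    rw [cntALoop.eq_def, goAlt.eq_def]
    rw [dif_pos hnow]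
    by_cases hK : N ≤ now + K
    · rw [dif_pos hK, if_pos hK]
    · rw [dif_neg hK, if_neg hK]
      have htake := takeWhile_le_eq_filter (now + K) rest hrest_pw
      have hcand_mem : ∀ c, c ∈ sp.filter (fun c => decide (now < c) && decide (c ≤ now + K)) ↔
          (c ∈ rest ∧ now < c ∧ c ≤ now + K) := by
        intro c
        constructor
        · intro hc
          have h1 := List.of_mem_filter hc
          have h2 := List.mem_of_mem_filter hc
          simp only [Bool.and_eq_true, decide_eq_true_eq] at h1
          have hcs : c ∈ pre ++ rest := by rw [← hsplit]; exact (hmem_s c).mpr h2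
          rcases List.mem_append.mp hcs with hp | hr
          · exact absurd (hpre c hp) (by omega)
          · exact ⟨hr, h1.1, h1.2⟩
        · intro ⟨hr, h1, h2⟩
          apply List.mem_filter.mpr
          refine ⟨?_, by simp [h1, h2]⟩
          apply (hmem_s c).mp
          rw [hsplit]; exact List.mem_append.mpr (Or.inr hr)
      by_cases hreach : rest.takeWhile (fun c => decide (c ≤ now + K)) = []
      · -- no reachable station at all ⇒ A's candidate list is empty too
        have hcand_nil : sp.filter (fun c => decide (now < c) && decide (c ≤ now + K)) = [] := by
          apply List.eq_nil_iff_forall_not_mem.mpr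
          intro c hc
          rcases (hcand_mem c).mp hc with ⟨hr, _, h2⟩
          have : c ∈ rest.filter (fun c => decide (c ≤ now + K)) :=
            List.mem_filter.mpr ⟨hr, by simp [h2]⟩
          rw [← htake, hreach] at this; simp at this
        rw [dif_pos (by simp [hcand_nil]), dif_pos (by simp [hreach])]
      · obtain ⟨b, hb⟩ : ∃ b, (rest.takeWhile (fun c => decide (c ≤ now + K))).getLast? = some b := by
          cases h0 : (rest.takeWhile (fun c => decide (c ≤ now + K))).getLast? with
          | none => exact absurd (List.getLast?_eq_none_iff.mp h0) hreach
          | some b => exact ⟨b, rfl⟩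
        have hreach_pw : (rest.takeWhile (fun c => decide (c ≤ now + K))).Pairwise (· ≤ ·) := by
          rw [htake]; exact hrest_pw.filter _
        have hb_mem : b ∈ rest.takeWhile (fun c => decide (c ≤ now + K)) := List.mem_of_getLast? hb
        have hb_rest : b ∈ rest := List.mem_of_mem_filter (htake ▸ hb_mem)
        have hb_le : b ≤ now + K := by
          have := List.of_mem_filter (htake ▸ hb_mem)
          simpa using this
        have hb_max : ∀ x ∈ rest, x ≤ now + K → x ≤ b := by
          intro x hx hxle
          exact le_getLast?_of_pairwise b _ hreach_pw hb x
            (htake ▸ List.mem_filter.mpr ⟨hx, by simpa using hxle⟩)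
        have hBlen : ¬ (rest.takeWhile (fun c => decide (c ≤ now + K))).length = 0 := by
          simp [List.length_eq_zero_iff, hreach]
        by_cases hbn : b ≤ now
        · -- every reachable station is already behind: A's candidate list is empty
          have hcand_nil : sp.filter (fun c => decide (now < c) && decide (c ≤ now + K)) = [] := by
            apply List.eq_nil_iff_forall_not_mem.mpr
            intro c hc
            rcases (hcand_mem c).mp hc with ⟨hr, h1, h2⟩
            have := hb_max c hr h2
            omega
          rw [dif_pos (show (sp.filter (fun c => decide (now < c) && decide (c ≤ now + K))).length = 0 by simp [hcand_nil])]
          rw [dif_neg hBlen, hb]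
          simp only [Option.getD_some]
          rw [if_pos hbn]
        · have hb_cand : b ∈ sp.filter (fun c => decide (now < c) && decide (c ≤ now + K)) :=
            (hcand_mem b).mpr ⟨hb_rest, by omega, hb_le⟩
          have hcand_ne : sp.filter (fun c => decide (now < c) && decide (c ≤ now + K)) ≠ [] := by
            intro h0; rw [h0] at hb_cand; simp at hb_cand
          rw [dif_neg (show ¬ (sp.filter (fun c => decide (now < c) && decide (c ≤ now + K))).length = 0 by simp [List.length_eq_zero_iff, hcand_ne])]
          rw [dif_neg hBlen, hb]
          simp only [Option.getD_some]
          rw [if_neg hbn]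
          obtain ⟨m, hm⟩ : ∃ m, PySem.List.max? (sp.filter (fun c => decide (now < c) && decide (c ≤ now + K))) (fun x => x) = some m := by
            cases hmx : PySem.List.max? (sp.filter (fun c => decide (now < c) && decide (c ≤ now + K))) (fun x => x) with
            | none => exact absurd ((PySem.List.max?_eq_none_iff _ _).mp hmx) hcand_ne
            | some m => exact ⟨m, rfl⟩
          rw [hm]
          simp only [Option.getD_some]
          have hm_mem := PySem.List.max?_mem hm
          have hm_max := PySem.List.max?_isMax hm
          rcases (hcand_mem m).mp hm_mem with ⟨hmr, hm1, hm2⟩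
          have hmb : m = b := by
            have h1 : b ≤ m := hm_max b hb_cand
            have h2 : m ≤ b := hb_max m hmr hm2
            omega
          subst hmb
          have hsplit' : PySem.List.sorted sp (fun x => x) false =
              (pre ++ rest.takeWhile (fun c => decide (c ≤ now + K))) ++
                rest.dropWhile (fun c => decide (c ≤ now + K)) := by
            rw [hsplit, List.append_assoc, List.takeWhile_append_dropWhile]
          have hpre' : ∀ x ∈ pre ++ rest.takeWhile (fun c => decide (c ≤ now + K)), x ≤ m := by
            intro x hx
            rcases List.mem_append.mp hx with hp | hr
            · have := hpre x hp; omega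
            · exact le_getLast?_of_pairwise m _ hreach_pw hb x hr
          have hlen' : (rest.dropWhile (fun c => decide (c ≤ now + K))).length < rest.length := by
            have h := List.takeWhile_append_dropWhile (p := fun c => decide (c ≤ now + K)) (l := rest)
            have h2 := congrArg List.length h
            simp only [List.length_append] at h2
            have : 0 < (rest.takeWhile (fun c => decide (c ≤ now + K))).length :=
              List.length_pos_iff.mpr hreach
            omega
          exact ih (rest.dropWhile (fun c => decide (c ≤ now + K))).length (by omega)
            (rest.dropWhile (fun c => decide (c ≤ now + K))) (le_refl _) m (cnt + 1)
            (pre ++ rest.takeWhile (fun c => decide (c ≤ now + K)))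
            (by omega) hsplit' hpre'

-- ===== VERDICT (by name: the statement is the Claim_ definition above) =====
theorem cnt_charge_spec : Claim_equal_cnt_charge := by
  intro K N M sp _hD hPre
  unfold Spec_cnt_charge cnt_charge cnt_charge_alt
  exact loop_eq K N sp (PySem.List.sorted sp (fun x => x) false).length
    (PySem.List.sorted sp (fun x => x) false) (le_refl _) 0 0 [] hPre (by simp) (by simp)
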